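-- pv_equiv track=rewrite | github.com/cs-ubbcluj-ro/FP-2023 | src/seminar/group_911/seminar_04.py | exponential_search_v2
-- ===== SOURCE A (Python) =====
-- def exponential_search_v2(data: list, n: int):
--     """
--     Search element n in list
--     :param data:
--     :param n:
--     :return: The position of element n, -1 if not found
--     """
--     if data[0] == n:
--         return 0
--     i = 1
--     while i < len(data) and data[i] < n:
--         i *= 2
--
--     for idx in range(i // 2, min(i + 1, len(data) - 1)):
--         if data[idx] == n:
--             return idx
--     return -1
-- ===== SOURCE B (Python) =====
-- def exponential_search_v2(data: list, n: int):
--     """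
--     Search element n in sorted list: exponential bound + leftmost binary search.
--     :return: The position of element n, -1 if not found
--     """
--     if data[0] == n:
--         return 0
--     i = 1
--     while i < len(data) and data[i] < n:
--         i *= 2
--     lo, hi = i // 2, min(i + 1, len(data))
--     while lo < hi:
--         mid = (lo + hi) // 2
--         if data[mid] < n:
--             lo = mid + 1
--         else:
--             hi = mid
--     if lo < len(data) and data[lo] == n:
--         return lo
--     return -1
-- ===== Notes on version B (the rewrite author's own statement) =====
-- stated objective: alternative
-- what changed: B replaces A's linear scan of the exponential range [i//2, i] by a leftmost binary search over that range, and searches up to min(i+1, len(data)) instead of A's min(i+1, len(data)-1), which silently skipped the last index.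
-- intended difference: On sorted lists of length >= 2 whose only occurrence of n is the last index, A returns -1 because its scan stops at min(i+1, len(data)-1) and never examines the last element, while B returns that index len(data)-1, the position a search is meant to report. — e.g. on exponential_search_v2([1, 2], 2): A returns -1, B returns 1
-- outside the precondition, e.g. on exponential_search_v2([3, 1, 2], 2): A returns -1, B returns 2
import Mathlib
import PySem

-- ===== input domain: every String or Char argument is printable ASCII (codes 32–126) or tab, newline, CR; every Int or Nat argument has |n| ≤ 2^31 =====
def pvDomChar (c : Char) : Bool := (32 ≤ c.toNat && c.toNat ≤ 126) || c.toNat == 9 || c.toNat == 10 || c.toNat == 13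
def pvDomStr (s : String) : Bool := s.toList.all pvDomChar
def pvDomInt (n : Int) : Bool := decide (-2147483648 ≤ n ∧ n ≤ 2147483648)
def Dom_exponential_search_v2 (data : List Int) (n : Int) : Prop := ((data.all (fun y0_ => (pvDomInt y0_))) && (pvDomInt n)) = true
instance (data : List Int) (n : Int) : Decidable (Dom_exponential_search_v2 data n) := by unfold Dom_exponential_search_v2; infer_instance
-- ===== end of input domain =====

-- B replaces A's linear scan of the exponential range by a leftmost binary search and
-- searches up to min(i+1, len(data)) instead of A's min(i+1, len(data)-1), which skipped
-- the last index (objective: alternative; the skipped corner is stated as D_ below).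

-- ===== PORT A =====
-- while i < len(data) and data[i] < n: i *= 2    (the '0 < i' conjunct is a termination
-- guard only: the loop is entered with i = 1 and i only grows, so it never changes the value)
-- fuel = len(data) makes the recursion structural; it never runs out on the actual call
-- (the loop makes at most len(data) - i successful steps), see pvExpLoopA_exit below
def pvExpLoopA (data : List Int) (n : Int) : Nat → Nat → Nat
  | 0, i => i
  | fuel + 1, i =>
      if 0 < i ∧ i < data.length ∧ data[i]?.getD 0 < n then pvExpLoopA data n fuel (i * 2)
      else i

-- for idx in range(...): if data[idx] == n: return idx  /  return -1
-- (every produced idx satisfies 0 ≤ idx < len(data) - 1, so data[idx] never raises)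
def pvScanA (data : List Int) (n : Int) : List Int → Int
  | [] => -1
  | idx :: rest => if PySem.List.pyGet? data idx = some n then idx else pvScanA data n rest

def exponential_search_v2 (data : List Int) (n : Int) : Int :=
  match PySem.List.pyGet? data 0 with
  | none => -1   -- data[0] raises IndexError on the empty list; excluded by Pre_
  | some d0 =>
    if d0 = n then 0
    else
      let i := pvExpLoopA data n data.length 1
      pvScanA data n
        (PySem.List.pyRange (PySem.Int.floordiv (i : Int) 2)
          (min ((i : Int) + 1) ((data.length : Int) - 1)) 1)

-- ===== PORT B =====
def pvExpLoopB (data : List Int) (n : Int) : Nat → Nat → Nat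
  | 0, i => i
  | fuel + 1, i =>
      if 0 < i ∧ i < data.length ∧ data[i]?.getD 0 < n then pvExpLoopB data n fuel (i * 2)
      else i

-- while lo < hi: mid = (lo+hi)//2; if data[mid] < n: lo = mid+1 else: hi = mid
-- (mid < hi ≤ len(data) at every call, so data[mid] never raises; lo, hi, mid are
-- nonnegative throughout, so Nat division is Python's floor division here)
-- fuel = len(data) makes the recursion structural; it never runs out on the actual call
-- (the loop makes at most hi - lo ≤ len(data) steps), see pvBisect_spec below
def pvBisect (data : List Int) (n : Int) : Nat → Nat → Nat → Nat
  | 0, lo, _ => lo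
  | fuel + 1, lo, hi =>
      if lo < hi then
        if data[(lo + hi) / 2]?.getD 0 < n then pvBisect data n fuel ((lo + hi) / 2 + 1) hi
        else pvBisect data n fuel lo ((lo + hi) / 2)
      else lo

def exponential_search_v2_alt (data : List Int) (n : Int) : Int :=
  match PySem.List.pyGet? data 0 with
  | none => -1   -- data[0] raises IndexError on the empty list; excluded by Pre_
  | some d0 =>
    if d0 = n then 0
    else
      let i := pvExpLoopB data n data.length 1
      let lo := pvBisect data n data.length (i / 2) (min (i + 1) data.length)
      if lo < data.length ∧ data[lo]?.getD 0 = n then (lo : Int) else -1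

-- ===== PRECONDITION & SPEC =====
-- Pre_ excludes the empty list (A raises IndexError there) and unsorted lists containing n,
-- on which A's scan result is an artefact of violating the sorted-input contract of a search.
def Pre_exponential_search_v2 (data : List Int) (n : Int) : Prop :=
  data ≠ [] ∧ (List.Pairwise (· ≤ ·) data ∨ n ∉ data)
instance (data : List Int) (n : Int) : Decidable (Pre_exponential_search_v2 data n) := by
  unfold Pre_exponential_search_v2; infer_instance

def pvWitness_exponential_search_v2 : List Int × Int := ([1, 2, 3], 2)

-- On sorted lists of length ≥ 2 whose only occurrence of n is the last index, A returns -1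
-- because its scan stops at min(i+1, len(data)-1) and never examines the last element,
-- while B returns that index len(data)-1, the position a search is meant to report.
def D_exponential_search_v2 (data : List Int) (n : Int) : Prop :=
  2 ≤ data.length ∧ List.Pairwise (· ≤ ·) data ∧ data.getLast? = some n ∧ n ∉ data.dropLast
instance (data : List Int) (n : Int) : Decidable (D_exponential_search_v2 data n) := by
  unfold D_exponential_search_v2; infer_instance

def Spec_exponential_search_v2 (data : List Int) (n : Int) (out : Int) : Prop :=
  ¬ D_exponential_search_v2 data n → out = exponential_search_v2_alt data n
instance (data : List Int) (n : Int) (out : Int) : Decidable (Spec_exponential_search_v2 data n out) := by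
  unfold Spec_exponential_search_v2; infer_instance

def pvDiffWitness_exponential_search_v2 : List Int × Int := ([1, 2], 2)
def pvDiffWitnessOut_exponential_search_v2 : Int × Int := (-1, 1)

-- ===== CLAIM (what is proved, stated in full; the proofs are below) =====
def Claim_unchanged_exponential_search_v2 : Prop := ∀ (data : List Int) (n : Int), Dom_exponential_search_v2 data n → Pre_exponential_search_v2 data n → Spec_exponential_search_v2 data n (exponential_search_v2 data n)
def Claim_changed_exponential_search_v2 : Prop := Dom_exponential_search_v2 (pvDiffWitness_exponential_search_v2.1) (pvDiffWitness_exponential_search_v2.2) ∧ Pre_exponential_search_v2 (pvDiffWitness_exponential_search_v2.1) (pvDiffWitness_exponential_search_v2.2) ∧ D_exponential_search_v2 (pvDiffWitness_exponential_search_v2.1) (pvDiffWitness_exponential_search_v2.2) ∧ exponential_search_v2 (pvDiffWitness_exponential_search_v2.1) (pvDiffWitness_exponential_search_v2.2) = pvDiffWitnessOut_exponential_search_v2.1 ∧ exponential_search_v2_alt (pvDiffWitness_exponential_search_v2.1) (pvDiffWitness_exponential_search_v2.2) = pvDiffWitnessOut_exponential_search_v2.2 ∧ pvDiffWitnessOut_exponential_search_v2.1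 ≠ pvDiffWitnessOut_exponential_search_v2.2
def Claim_exact_exponential_search_v2 : Prop := ∀ (data : List Int) (n : Int), Dom_exponential_search_v2 data n → Pre_exponential_search_v2 data n → D_exponential_search_v2 data n → exponential_search_v2 data n ≠ exponential_search_v2_alt data n

-- ===== LEMMAS AND PROOFS =====

theorem pvExpLoopB_eq (data : List Int) (n : Int) (fuel i : Nat) :
    pvExpLoopB data n fuel i = pvExpLoopA data n fuel i := by
  induction fuel generalizing i with
  | zero => rfl
  | succ fuel ih => simp only [pvExpLoopB, pvExpLoopA, ih]

theorem pvExpLoopA_pos (data : List Int) (n : Int) (fuel i : Nat) (hi : 0 < i) :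
    0 < pvExpLoopA data n fuel i := by
  induction fuel generalizing i with
  | zero => exact hi
  | succ fuel ih =>
      simp only [pvExpLoopA]
      split
      · exact ih (i * 2) (by omega)
      · exact hi

-- loop exit: the final i has i ≥ len(data) or data[i] ≥ n
theorem pvExpLoopA_exit (data : List Int) (n : Int) (fuel i : Nat) (hi : 0 < i)
    (hf : data.length ≤ fuel + i)
    (hlt : pvExpLoopA data n fuel i < data.length) :
    ¬ data[pvExpLoopA data n fuel i]?.getD 0 < n := by
  induction fuel generalizing i with
  | zero => simp only [pvExpLoopA] at hlt ⊢; omega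
  | succ fuel ih =>
      simp only [pvExpLoopA] at hlt ⊢
      split at hlt
      · next h =>
          rw [if_pos h]
          exact ih (i * 2) (by omega) (by omega) hlt
      · next h =>
          rw [if_neg h]
          intro hx
          exact h ⟨hi, hlt, hx⟩

-- loop invariant: the final i is still 1, or data[i/2] < n
theorem pvExpLoopA_half (data : List Int) (n : Int) (fuel i : Nat)
    (hinv : i = 1 ∨ (i / 2 < data.length ∧ data[i / 2]?.getD 0 < n)) :
    pvExpLoopA data n fuel i = 1 ∨
      (pvExpLoopA data n fuel i / 2 < data.length ∧
        data[pvExpLoopA data n fuel i / 2]?.getD 0 < n) := by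
  induction fuel generalizing i with
  | zero => exact hinv
  | succ fuel ih =>
      simp only [pvExpLoopA]
      split
      · next h =>
          refine ih (i * 2) (Or.inr ?_)
          have h2 : i * 2 / 2 = i := by omega
          rw [h2]
          exact ⟨h.2.1, h.2.2⟩
      · exact hinv

theorem pvScanA_none (data : List Int) (n : Int) (l : List Int)
    (h : ∀ idx ∈ l, PySem.List.pyGet? data idx ≠ some n) :
    pvScanA data n l = -1 := by
  induction l with
  | nil => rfl
  | cons x xs ih =>
      simp only [pvScanA]
      rw [if_neg (h x (by simp))]
      exact ih (fun idx hm => h idx (by simp [hm]))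

-- scanning range(a, b): if f is the first index of the list with data[f] = n and a ≤ f < b,
-- the scan returns f
theorem pvScanA_range_finds (data : List Int) (n : Int) (a b f : Nat)
    (haf : a ≤ f) (hfb : f < b) (hfirst : ∀ j < f, data[j]? ≠ some n)
    (hf : data[f]? = some n) :
    pvScanA data n (PySem.List.pyRange (a : Int) (b : Int) 1) = f := by
  have hab : (a : Int) < (b : Int) := by omega
  rw [PySem.List.pyRange_one_cons hab]
  simp only [pvScanA]
  rcases Nat.eq_or_lt_of_le haf with he | hlt
  · subst he
    rw [if_pos (by rw [PySem.List.pyGet?_natCast]; exact hf)]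
  · rw [if_neg (by rw [PySem.List.pyGet?_natCast]; exact hfirst a hlt)]
    have hc : ((a : Int) + 1) = ((a + 1 : Nat) : Int) := by omega
    rw [hc]
    exact pvScanA_range_finds data n (a+1) b f (by omega) hfb hfirst hf
termination_by b - a

theorem getD_mono (data : List Int) (hs : List.Pairwise (· ≤ ·) data) (j k : Nat)
    (hjk : j ≤ k) (hk : k < data.length) : data[j]?.getD 0 ≤ data[k]?.getD 0 := by
  have hj : j < data.length := Nat.lt_of_le_of_lt hjk hk
  rw [List.getElem?_eq_getElem hj, List.getElem?_eq_getElem hk]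
  rcases Nat.eq_or_lt_of_le hjk with he | hlt
  · subst he; simp
  · simpa using (List.pairwise_iff_getElem.mp hs) j k hj hk hlt

-- binary-search invariant: everything left of the result is < n, the result (if < hi) is ≥ n
theorem pvBisect_spec (data : List Int) (n : Int) (hs : List.Pairwise (· ≤ ·) data) :
    ∀ fuel lo hi, hi - lo ≤ fuel → lo ≤ hi → hi ≤ data.length →
    lo ≤ pvBisect data n fuel lo hi ∧ pvBisect data n fuel lo hi ≤ hi ∧
      (∀ j, lo ≤ j → j < pvBisect data n fuel lo hi → data[j]?.getD 0 < n) ∧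
      (pvBisect data n fuel lo hi < hi → ¬ data[pvBisect data n fuel lo hi]?.getD 0 < n) := by
  intro fuel
  induction fuel with
  | zero =>
      intro lo hi hk hlohi hhi
      have he : lo = hi := by omega
      subst he
      simp only [pvBisect]
      exact ⟨le_refl _, le_refl _, fun j h1 h2 => absurd (Nat.lt_of_le_of_lt h1 h2) (lt_irrefl _),
        fun h => absurd h (lt_irrefl _)⟩
  | succ k ih =>
      intro lo hi hk hlohi hhi
      by_cases hlt : lo < hi
      · simp only [pvBisect]
        rw [if_pos hlt]
        set mid := (lo + hi) / 2 with hmid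
        by_cases hc : data[mid]?.getD 0 < n
        · rw [if_pos hc]
          obtain ⟨r1, r2, r3, r4⟩ := ih (mid + 1) hi (by omega) (by omega) hhi
          refine ⟨by omega, r2, ?_, r4⟩
          intro j hj1 hj2
          by_cases hjm : j ≤ mid
          · exact lt_of_le_of_lt (getD_mono data hs j mid hjm (by omega)) hc
          · exact r3 j (by omega) hj2
        · rw [if_neg hc]
          obtain ⟨r1, r2, r3, r4⟩ := ih lo mid (by omega) (by omega) (by omega)
          refine ⟨r1, by omega, r3, ?_⟩
          intro hr
          by_cases hrm : pvBisect data n k lo mid < mid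
          · exact r4 hrm
          · have he : pvBisect data n k lo mid = mid := by omega
            rw [he]
            exact hc
      · simp only [pvBisect]
        rw [if_neg hlt]
        exact ⟨le_refl _, hlohi, fun j h1 h2 => absurd (Nat.lt_of_le_of_lt h1 h2) (lt_irrefl _),
          fun h => absurd h hlt⟩

theorem idxOf_min (l : List Int) (n : Int) (j : Nat) (hj : j < l.length) (h : j < l.idxOf n) :
    l[j] ≠ n := by
  induction l generalizing j with
  | nil => simp at hj
  | cons a t ih =>
      rw [List.idxOf_cons] at h
      by_cases ha : a = n
      · rw [show (a == n) = true by simp [ha]] at h; simp at h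
      · rw [show (a == n) = false by simp [ha]] at h; simp at h
        cases j with
        | zero => simpa using ha
        | succ m => simpa using ih m (by simpa using hj) (by omega)

theorem A_notmem (data : List Int) (n : Int) (hne : data ≠ []) (hm : n ∉ data) :
    exponential_search_v2 data n = -1 := by
  have hL : 0 < data.length := List.length_pos_iff.mpr hne
  have h0 : PySem.List.pyGet? data 0 = some (data[0]'hL) := by
    rw [PySem.List.pyGet?_zero, List.getElem?_eq_getElem hL]
  unfold exponential_search_v2
  rw [h0]
  simp only
  rw [if_neg (show ¬ (data[0]'hL = n) from fun he => hm (he ▸ List.getElem_mem hL))]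
  apply pvScanA_none
  intro idx _ hget
  exact hm (PySem.List.mem_of_pyGet?_eq_some _ hget)

theorem B_notmem (data : List Int) (n : Int) (hne : data ≠ []) (hm : n ∉ data) :
    exponential_search_v2_alt data n = -1 := by
  have hL : 0 < data.length := List.length_pos_iff.mpr hne
  have h0 : PySem.List.pyGet? data 0 = some (data[0]'hL) := by
    rw [PySem.List.pyGet?_zero, List.getElem?_eq_getElem hL]
  unfold exponential_search_v2_alt
  rw [h0]
  simp only
  rw [if_neg (show ¬ (data[0]'hL = n) from fun he => hm (he ▸ List.getElem_mem hL))]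
  have hcond : ∀ lo : Nat, ¬ (lo < data.length ∧ data[lo]?.getD 0 = n) := by
    rintro lo ⟨hlt, heq⟩
    rw [List.getElem?_eq_getElem hlt, Option.getD_some] at heq
    exact hm (heq ▸ List.getElem_mem hlt)
  rw [if_neg (hcond _)]

theorem idxOf_zero_of_head (data : List Int) (n : Int) (hL : 0 < data.length)
    (h0 : data[0]'hL = n) : data.idxOf n = 0 := by
  by_contra hne0
  exact idxOf_min data n 0 hL (by omega) h0

-- the first occurrence of n lies in the window [i/2, i] left by the doubling loop
theorem idxOf_in_window (data : List Int) (n : Int) (hs : List.Pairwise (· ≤ ·) data)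
    (hm : n ∈ data) :
    pvExpLoopA data n data.length 1 / 2 ≤ data.idxOf n ∧
      data.idxOf n ≤ pvExpLoopA data n data.length 1 := by
  set r := pvExpLoopA data n data.length 1 with hrdef
  set f := data.idxOf n with hfdef
  have hfL : f < data.length := List.idxOf_lt_length_of_mem hm
  have hfval : data[f] = n := List.getElem_idxOf hfL
  have hfD : data[f]?.getD 0 = n := by
    rw [List.getElem?_eq_getElem hfL, Option.getD_some, hfval]
  have hhalf := pvExpLoopA_half data n data.length 1 (Or.inl rfl)
  rw [← hrdef] at hhalf
  constructor
  · by_contra hcon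
    have hflt : f < r / 2 := by omega
    rcases hhalf with h1 | ⟨hhL, hhlt⟩
    · omega
    · have := getD_mono data hs f (r / 2) (by omega) hhL
      rw [hfD] at this
      omega
  · by_cases hrL : r < data.length
    · by_contra hcon
      have hrf : r < f := by omega
      have hexit := pvExpLoopA_exit data n data.length 1 (by omega) (by omega)
        (by rw [← hrdef]; exact hrL)
      rw [← hrdef] at hexit
      have hle := getD_mono data hs r f (by omega) hfL
      rw [hfD] at hle
      have hrval : data[r]?.getD 0 = n := by omega
      rw [List.getElem?_eq_getElem hrL, Option.getD_some] at hrval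
      exact idxOf_min data n r hrL hrf hrval
    · omega

theorem A_char (data : List Int) (n : Int) (hne : data ≠ [])
    (hs : List.Pairwise (· ≤ ·) data) :
    exponential_search_v2 data n =
      if n ∈ data then
        (if data.idxOf n + 2 ≤ data.length ∨ data.idxOf n = 0 then (data.idxOf n : Int) else -1)
      else -1 := by
  have hL : 0 < data.length := List.length_pos_iff.mpr hne
  have h0get : PySem.List.pyGet? data 0 = some (data[0]'hL) := by
    rw [PySem.List.pyGet?_zero, List.getElem?_eq_getElem hL]
  unfold exponential_search_v2
  rw [h0get]
  simp only
  by_cases h0 : data[0]'hL = n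
  · rw [if_pos h0, if_pos (h0 ▸ List.getElem_mem hL), idxOf_zero_of_head data n hL h0]
    norm_num
  · rw [if_neg h0]
    set r := pvExpLoopA data n data.length 1 with hrdef
    have hr1 : 1 ≤ r := pvExpLoopA_pos data n data.length 1 (by omega)
    have hc1 : PySem.Int.floordiv (r : Int) 2 = ((r / 2 : Nat) : Int) := by
      exact_mod_cast PySem.Int.floordiv_natCast r 2
    have hc2 : min ((r : Int) + 1) ((data.length : Int) - 1)
        = ((min (r + 1) (data.length - 1) : Nat) : Int) := by omega
    rw [hc1, hc2]
    by_cases hm : n ∈ data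
    · rw [if_pos hm]
      set f := data.idxOf n with hfdef
      obtain ⟨hwlo, hwr⟩ := idxOf_in_window data n hs hm
      rw [← hrdef, ← hfdef] at hwlo hwr
      have hfL : f < data.length := List.idxOf_lt_length_of_mem hm
      have hfval : data[f] = n := List.getElem_idxOf hfL
      have hf0 : f ≠ 0 := by
        intro he
        apply h0
        have := hfval
        simp only [he] at this
        exact this
      have hfirst : ∀ j < f, data[j]? ≠ some n := by
        intro j hj hcon
        rw [List.getElem?_eq_getElem (by omega : j < data.length)] at hcon
        exact idxOf_min data n j (by omega) hj (Option.some.inj hcon)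
      by_cases hsmall : f + 2 ≤ data.length
      · rw [if_pos (Or.inl hsmall)]
        exact pvScanA_range_finds data n (r / 2) (min (r + 1) (data.length - 1)) f
          hwlo (by omega) hfirst
          (by rw [List.getElem?_eq_getElem hfL, hfval])
      · rw [if_neg (by omega)]
        apply pvScanA_none
        intro idx hmem hget
        have hb := (PySem.List.mem_pyRange_one.mp hmem)
        have hnn : (0 : Int) ≤ idx := by omega
        rw [PySem.List.pyGet?_of_nonneg (h := hnn)] at hget
        have hjb : idx.toNat < min (r + 1) (data.length - 1) := by omega
        exact hfirst idx.toNat (by omega) hget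
    · rw [if_neg hm]
      apply pvScanA_none
      intro idx _ hget
      exact hm (PySem.List.mem_of_pyGet?_eq_some _ hget)

theorem B_char (data : List Int) (n : Int) (hne : data ≠ [])
    (hs : List.Pairwise (· ≤ ·) data) :
    exponential_search_v2_alt data n = if n ∈ data then (data.idxOf n : Int) else -1 := by
  have hL : 0 < data.length := List.length_pos_iff.mpr hne
  have h0get : PySem.List.pyGet? data 0 = some (data[0]'hL) := by
    rw [PySem.List.pyGet?_zero, List.getElem?_eq_getElem hL]
  unfold exponential_search_v2_alt
  rw [h0get]
  simp only [pvExpLoopB_eq]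
  by_cases h0 : data[0]'hL = n
  · rw [if_pos h0, if_pos (h0 ▸ List.getElem_mem hL), idxOf_zero_of_head data n hL h0]
    norm_num
  · rw [if_neg h0]
    set r := pvExpLoopA data n data.length 1 with hrdef
    have hr1 : 1 ≤ r := pvExpLoopA_pos data n data.length 1 (by omega)
    have hhalf := pvExpLoopA_half data n data.length 1 (Or.inl rfl)
    rw [← hrdef] at hhalf
    have hlohi : r / 2 ≤ min (r + 1) data.length := by
      rcases hhalf with h1 | ⟨hhL, _⟩ <;> omega
    obtain ⟨t1, t2, t3, t4⟩ := pvBisect_spec data n hs data.length (r / 2)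
      (min (r + 1) data.length) (by omega) hlohi (by omega)
    set t := pvBisect data n data.length (r / 2) (min (r + 1) data.length) with htdef
    by_cases hm : n ∈ data
    · rw [if_pos hm]
      set f := data.idxOf n with hfdef
      obtain ⟨hwlo, hwr⟩ := idxOf_in_window data n hs hm
      rw [← hrdef, ← hfdef] at hwlo hwr
      have hfL : f < data.length := List.idxOf_lt_length_of_mem hm
      have hfval : data[f] = n := List.getElem_idxOf hfL
      have hfD : data[f]?.getD 0 = n := by
        rw [List.getElem?_eq_getElem hfL, Option.getD_some, hfval]
      have hfhi : f < min (r + 1) data.length := by omega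
      have hle1 : t ≤ f := by
        by_contra hcon
        have := t3 f hwlo (by omega)
        omega
      have hle2 : f ≤ t := by
        by_contra hcon
        have htf : t < f := by omega
        have hnlt := t4 (by omega)
        have hle := getD_mono data hs t f (by omega) hfL
        rw [hfD] at hle
        have htval : data[t]?.getD 0 = n := by omega
        rw [List.getElem?_eq_getElem (by omega : t < data.length), Option.getD_some] at htval
        exact idxOf_min data n t (by omega) htf htval
      have hte : t = f := by omega
      rw [if_pos ⟨by omega, by rw [hte]; exact hfD⟩, hte]
    · rw [if_neg hm]
      have hcond : ¬ (t < data.length ∧ data[t]?.getD 0 = n) := by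
        rintro ⟨hlt, heq⟩
        rw [List.getElem?_eq_getElem hlt, Option.getD_some] at heq
        exact hm (heq ▸ List.getElem_mem hlt)
      rw [if_neg hcond]

-- inside D_, the first occurrence of n is the last index
theorem D_idxOf (data : List Int) (n : Int) (hd : D_exponential_search_v2 data n) :
    n ∈ data ∧ data.idxOf n = data.length - 1 := by
  obtain ⟨hL2, _hs, hlast, hnd⟩ := hd
  have hL : 0 < data.length := by omega
  rw [List.getLast?_eq_getElem?, List.getElem?_eq_getElem (by omega)] at hlast
  have hval : data[data.length - 1]'(by omega) = n := Option.some.inj hlast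
  have hm : n ∈ data := hval ▸ List.getElem_mem (by omega)
  refine ⟨hm, ?_⟩
  have hfL : data.idxOf n < data.length := List.idxOf_lt_length_of_mem hm
  by_contra hne1
  have hflt : data.idxOf n < data.length - 1 := by omega
  apply hnd
  refine List.mem_iff_getElem.mpr ⟨data.idxOf n, ?_, ?_⟩
  · rw [List.length_dropLast]; exact hflt
  · rw [List.getElem_dropLast]
    exact List.getElem_idxOf hfL

-- ===== VERDICT (by name: the statement is the Claim_ definition above) =====
theorem exponential_search_v2_spec : Claim_unchanged_exponential_search_v2 := by
  intro data n _hdom hpre hnd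
  obtain ⟨hne, hso⟩ := hpre
  rcases hso with hs | hm
  · rw [A_char data n hne hs, B_char data n hne hs]
    by_cases hm : n ∈ data
    · rw [if_pos hm, if_pos hm]
      by_cases hc : data.idxOf n + 2 ≤ data.length ∨ data.idxOf n = 0
      · rw [if_pos hc]
      · exfalso
        apply hnd
        have hfL : data.idxOf n < data.length := List.idxOf_lt_length_of_mem hm
        have hf : data.idxOf n = data.length - 1 := by omega
        have hL2 : 2 ≤ data.length := by omega
        refine ⟨hL2, hs, ?_, ?_⟩
        · rw [List.getLast?_eq_getElem?, List.getElem?_eq_getElem (by omega)]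
          have := List.getElem_idxOf (xs := data) (x := n) hfL
          simp only [hf] at this
          rw [this]
        · intro hmem
          obtain ⟨j, hj, hval⟩ := List.mem_iff_getElem.mp hmem
          rw [List.length_dropLast] at hj
          rw [List.getElem_dropLast] at hval
          exact idxOf_min data n j (by omega) (by omega) hval
    · rw [if_neg hm, if_neg hm]
  · rw [A_notmem data n hne hm, B_notmem data n hne hm]

theorem exponential_search_v2_changed : Claim_changed_exponential_search_v2 := by
  unfold Claim_changed_exponential_search_v2
  refine ⟨by decide, by decide, by decide, ?_, ?_, by decide⟩
  · rw [show pvDiffWitness_exponential_search_v2 = ([1, 2], 2) from rfl]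
    rw [A_char [1, 2] 2 (by decide) (by decide)]
    decide
  · rw [show pvDiffWitness_exponential_search_v2 = ([1, 2], 2) from rfl]
    rw [B_char [1, 2] 2 (by decide) (by decide)]
    decide

theorem exponential_search_v2_tight : Claim_exact_exponential_search_v2 := by
  intro data n _hdom hpre hd
  obtain ⟨hne, _⟩ := hpre
  obtain ⟨hm, hf⟩ := D_idxOf data n hd
  obtain ⟨hL2, hs, _, _⟩ := hd
  rw [A_char data n hne hs, B_char data n hne hs, if_pos hm, if_pos hm]
  have hfL : data.idxOf n < data.length := List.idxOf_lt_length_of_mem hm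
  rw [if_neg (by omega)]
  rw [hf]
  intro hcon
  omega
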